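-- pv_equiv track=rewrite | github.com/baidubce/app-builder | python/utils/tool_definition_docstring.py | _parse_function_description_from_docstrings
-- ===== SOURCE A (Python) =====
-- def _parse_function_description_from_docstrings(docstring: str) -> str:
--     # we will return first text until first empty line
--     if docstring is None:
--         return None
--
--     lines = docstring.splitlines()
--     description = []
--     for line in lines:
--         line = line.strip()
--         if line:
--             description.append(line)
--         elif description:
--             # if we have already some description, we stop at first empty line ... else continue
--             break
--     return "\n".join(description)
-- ===== SOURCE B (Python) =====
-- def _parse_function_description_from_docstrings(docstring: str) -> str:
--     # simpler: strip every line once, locate the first paragraph by index, join its lines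
--     if docstring is None:
--         return None
--     stripped = [line.strip() for line in docstring.splitlines()]
--     start = next((i for i, line in enumerate(stripped) if line), len(stripped))
--     stop = next((i for i in range(start, len(stripped)) if not stripped[i]), len(stripped))
--     return "\n".join(stripped[start:stop])
-- ===== Notes on version B (the rewrite author's own statement) =====
-- stated objective: simpler
-- what changed: Replaces the stateful accumulate-with-break loop by a one-shot strip of all lines followed by index arithmetic (first non-blank index, next blank index) and a single slice+join of the first paragraph.
import Mathlib
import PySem

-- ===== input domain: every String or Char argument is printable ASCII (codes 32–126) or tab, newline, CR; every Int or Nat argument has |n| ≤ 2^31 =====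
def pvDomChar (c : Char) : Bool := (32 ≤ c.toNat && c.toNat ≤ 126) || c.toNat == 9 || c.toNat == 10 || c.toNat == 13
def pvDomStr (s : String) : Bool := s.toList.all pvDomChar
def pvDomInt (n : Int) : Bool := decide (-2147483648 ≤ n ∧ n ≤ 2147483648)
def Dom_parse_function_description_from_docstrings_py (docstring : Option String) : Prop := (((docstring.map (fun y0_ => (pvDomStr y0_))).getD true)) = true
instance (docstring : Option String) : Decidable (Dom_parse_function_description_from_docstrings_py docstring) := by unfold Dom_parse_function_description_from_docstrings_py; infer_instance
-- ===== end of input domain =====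

-- B strips every line once and extracts the first paragraph by index arithmetic and one slice,
-- instead of A's accumulate-with-break loop; same values everywhere (objective: simpler).

-- ===== PORT A =====
-- the for-loop with break: acc is `description`
def pvLoopA : List String → List String → List String
  | [], acc => acc
  | l :: rest, acc =>
    let line := PySem.Str.strip l
    if line != "" then pvLoopA rest (acc ++ [line])
    else if acc != [] then acc
    else pvLoopA rest acc

def parse_function_description_from_docstrings_py (docstring : Option String) : Option String :=
  match docstring with
  | none => none
  | some d =>
    let lines := PySem.Str.splitlines d
    some (PySem.Str.join "\n" (pvLoopA lines []))

-- ===== PORT B =====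
def parse_function_description_from_docstrings_py_alt (docstring : Option String) : Option String :=
  match docstring with
  | none => none
  | some d =>
    let stripped := (PySem.Str.splitlines d).map PySem.Str.strip
    -- next((i for i, line in enumerate(stripped) if line), len(stripped))
    let start := stripped.findIdx (fun line => line != "")
    -- next((i for i in range(start, len(stripped)) if not stripped[i]), len(stripped))
    let stop := start + (stripped.drop start).findIdx (fun line => line == "")
    some (PySem.Str.join "\n" (PySem.List.slice stripped (some (start : Int)) (some (stop : Int))))

-- ===== PRECONDITION & SPEC =====
def Spec_parse_function_description_from_docstrings_py (docstring : Option String) (out : Option String) : Prop := out = parse_function_description_from_docstrings_py_alt docstring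
instance (docstring : Option String) (out : Option String) : Decidable (Spec_parse_function_description_from_docstrings_py docstring out) := by unfold Spec_parse_function_description_from_docstrings_py; infer_instance

-- ===== CLAIM (what is proved, stated in full; the proofs are below) =====
def Claim_equal_parse_function_description_from_docstrings_py : Prop := ∀ (docstring : Option String), Dom_parse_function_description_from_docstrings_py docstring → Spec_parse_function_description_from_docstrings_py docstring (parse_function_description_from_docstrings_py docstring)

-- ===== LEMMAS AND PROOFS =====

-- once the accumulator is nonempty, the loop appends stripped lines until the first blank
theorem pvLoopA_ne (ls : List String) (acc : List String) (h : acc ≠ []) :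
    pvLoopA ls acc = acc ++ (ls.map PySem.Str.strip).takeWhile (fun l => l != "") := by
  induction ls generalizing acc with
  | nil => simp [pvLoopA]
  | cons l rest ih =>
    by_cases hl : PySem.Str.strip l = ""
    · simp [pvLoopA, hl, h]
    · simp [pvLoopA, hl, ih (acc ++ [PySem.Str.strip l]) (by simp)]

theorem pvLoopA_nil (ls : List String) :
    pvLoopA ls [] =
      ((ls.map PySem.Str.strip).dropWhile (fun l => l == "")).takeWhile (fun l => l != "") := by
  induction ls with
  | nil => simp [pvLoopA]
  | cons l rest ih =>
    by_cases hl : PySem.Str.strip l = ""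
    · simp [pvLoopA, hl, ih]
    · simp [pvLoopA, hl, pvLoopA_ne (rest) [PySem.Str.strip l] (by simp)]

-- dropping up to the first non-blank line = dropWhile blank
theorem drop_findIdx_eq_dropWhile (ss : List String) :
    ss.drop (ss.findIdx (fun l => l != "")) = ss.dropWhile (fun l => l == "") := by
  induction ss with
  | nil => simp
  | cons s t ih =>
    by_cases hs : s = ""
    · simp [List.findIdx_cons, hs, ih]
    · have h1 : (s != "") = true := by simpa using hs
      simp [List.findIdx_cons, h1, hs]

-- taking up to the first blank line = takeWhile non-blank
theorem take_findIdx_eq_takeWhile (ds : List String) :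
    ds.take (ds.findIdx (fun l => l == "")) = ds.takeWhile (fun l => l != "") := by
  induction ds with
  | nil => simp
  | cons s t ih =>
    by_cases hs : s = ""
    · simp [List.findIdx_cons, hs]
    · have h1 : (s == "") = false := by simpa using hs
      simp [List.findIdx_cons, h1, hs, ih]

-- B's slice with the two found indices is exactly the first paragraph
theorem bside (ss : List String) :
    PySem.List.slice ss (some ((ss.findIdx (fun l => l != "") : Nat) : Int))
      (some (((ss.findIdx (fun l => l != "")
        + (ss.drop (ss.findIdx (fun l => l != ""))).findIdx (fun l => l == "")) : Nat) : Int))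
    = (ss.dropWhile (fun l => l == "")).takeWhile (fun l => l != "") := by
  rw [Nat.cast_add, PySem.List.slice_natCast_add, drop_findIdx_eq_dropWhile,
    ← drop_findIdx_eq_dropWhile, take_findIdx_eq_takeWhile, drop_findIdx_eq_dropWhile]

-- ===== VERDICT (by name: the statement is the Claim_ definition above) =====
theorem parse_function_description_from_docstrings_py_spec : Claim_equal_parse_function_description_from_docstrings_py := by
  intro docstring _
  unfold Spec_parse_function_description_from_docstrings_py
  cases docstring with
  | none => rfl
  | some d =>
    simp only [parse_function_description_from_docstrings_py,
      parse_function_description_from_docstrings_py_alt]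
    rw [pvLoopA_nil, bside]
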